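-- pv_equiv track=rewrite | github.com/MoonDD99/Coding_test | python/숫자 게임.py | solution
-- ===== SOURCE A (Python) =====
-- import heapq
--
-- def solution(A, B):
--     answer = 0
--     heapA = []
--     heapB = []
--
--     for value in A:
--         heapq.heappush(heapA,-value)
--
--     for value in B:
--         heapq.heappush(heapB,-value)
--     while heapB and heapA:
--         a = -heapq.heappop(heapA)
--         b = -heapq.heappop(heapB)
--         if a < b:
--             answer += 1
--         else:
--             heapq.heappush(heapB, -b)
--
--     return answer
-- ===== SOURCE B (Python) =====
-- def solution(A, B):
--     # Sweep-line: merge both lists into one event list (A as odd keys 2a+1,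
--     # B as even keys 2b, so an A element sorts just above an equal B element),
--     # sort it once descending, and scan with a bank of available B elements.
--     events = sorted([2 * a + 1 for a in A] + [2 * b for b in B], reverse=True)
--     avail = 0
--     answer = 0
--     for e in events:
--         if e % 2 == 0:      # a B element: bank it (it beats every later A element)
--             avail += 1
--         elif avail:         # an A element: consume one banked B, if any
--             avail -= 1
--             answer += 1
--     return answer
-- ===== Notes on version B (the rewrite author's own statement) =====
-- stated objective: faster
-- what changed: Replaces the two max-heaps with their pop/conditional-re-push loop by a sweep line: both lists are merged into one event list (A encoded as odd keys 2a+1, B as even keys 2b so an equal value puts the A event first), sorted once descending, and scanned with a single counter of banked B elements.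
import Mathlib
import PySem

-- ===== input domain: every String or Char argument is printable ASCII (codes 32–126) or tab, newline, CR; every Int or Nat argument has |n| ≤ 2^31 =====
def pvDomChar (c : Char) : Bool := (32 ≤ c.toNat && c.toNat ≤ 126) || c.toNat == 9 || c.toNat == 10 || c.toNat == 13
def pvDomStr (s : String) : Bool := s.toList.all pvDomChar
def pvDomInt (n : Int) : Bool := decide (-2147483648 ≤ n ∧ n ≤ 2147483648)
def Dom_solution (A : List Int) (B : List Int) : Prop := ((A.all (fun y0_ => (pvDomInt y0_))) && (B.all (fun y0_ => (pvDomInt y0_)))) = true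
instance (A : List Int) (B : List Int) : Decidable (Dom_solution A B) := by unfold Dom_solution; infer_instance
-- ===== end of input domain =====

-- B replaces A's two heaps (pop-max loop re-pushing unused B elements) by one merged
-- sweep: encode A as odd keys, B as even keys, sort the combined list once descending,
-- and scan it with a counter of banked B elements (objective: faster by a constant
-- factor, measured). Neither implementation mutates its arguments.

-- ===== PORT A =====
-- heapq heaps of ints are modelled as ascending sorted lists: heappush = ordered insert
-- (PySem's stable insertion-sort insert), heappop = take the head (the minimum).
-- This is exact for everything A observes: the sequence of popped values.
def hpush (h : List Int) (v : Int) : List Int :=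
  PySem.List.insertBy (fun a b => decide (a < b)) v h

-- the 'while heapB and heapA' loop; stops when either heap is empty
def aloop : List Int → List Int → Int → Int
  | [], _, ans => ans
  | _ :: _, [], ans => ans
  | na :: ha, nb :: hb, ans =>
      let a := -na
      let b := -nb
      if a < b then aloop ha hb (ans + 1)
      else aloop ha (hpush hb (-b)) ans

def solution (A : List Int) (B : List Int) : Int :=
  let heapA := A.foldl (fun h v => hpush h (-v)) []
  let heapB := B.foldl (fun h v => hpush h (-v)) []
  aloop heapA heapB 0

-- ===== PORT B =====
-- 'for e in events: if e % 2 == 0: avail += 1; elif avail: avail -= 1; answer += 1'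
-- as a fold over the event list with state (avail, answer); 'elif avail' is avail ≠ 0.
def bstep (s : Int × Int) (e : Int) : Int × Int :=
  if PySem.Int.mod e 2 = 0 then (s.1 + 1, s.2)
  else if s.1 ≠ 0 then (s.1 - 1, s.2 + 1)
  else s

def solution_alt (A : List Int) (B : List Int) : Int :=
  let events := PySem.List.sorted (A.map (fun a => 2 * a + 1) ++ B.map (fun b => 2 * b))
      (fun x => x) true
  (events.foldl bstep (0, 0)).2

-- ===== PRECONDITION & SPEC =====
def Spec_solution (A : List Int) (B : List Int) (out : Int) : Prop := out = solution_alt A B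
instance (A : List Int) (B : List Int) (out : Int) : Decidable (Spec_solution A B out) := by unfold Spec_solution; infer_instance

-- ===== CLAIM (what is proved, stated in full; the proofs are below) =====
def Claim_equal_solution : Prop := ∀ (A : List Int) (B : List Int), Dom_solution A B → Spec_solution A B (solution A B)

-- ===== LEMMAS AND PROOFS =====

-- proof-side two-pointer greedy over both lists sorted descending (the common middle form)
def altLoop : List Int → List Int → Int → Int
  | [], _, ans => ans
  | _ :: _, [], ans => ans
  | a :: rest, b0 :: btail, ans =>
      if a < b0 then altLoop rest btail (ans + 1)
      else altLoop rest (b0 :: btail) ans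

-- descending merge of two descending lists, left first on ties
def mergeDesc : List Int → List Int → List Int
  | [], l => l
  | l, [] => l
  | a :: as_, b :: bs =>
      if b ≤ a then a :: mergeDesc as_ (b :: bs) else b :: mergeDesc (a :: as_) bs
termination_by l₁ l₂ => l₁.length + l₂.length

-- inserting an element ≤ everything puts it in front
theorem insertBy_bottom (x : Int) (l : List Int) (h : ∀ y ∈ l, x ≤ y) :
    PySem.List.insertBy (fun a b => decide (a < b)) x l = x :: l := by
  induction l with
  | nil => rfl
  | cons y t ih =>
      have hxy : x ≤ y := h y (by simp)
      by_cases hlt : x < y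
      · simp [PySem.List.insertBy, hlt]
      · have hxy' : x = y := le_antisymm hxy (not_lt.mp hlt)
        have ht : PySem.List.insertBy (fun a b => decide (a < b)) x t = x :: t :=
          ih (fun z hz => h z (by simp [hz]))
        subst hxy'
        simp [PySem.List.insertBy, ht]

-- the heap built from xs is the descending sort of xs, negated
theorem build_eq (xs : List Int) :
    xs.foldl (fun h v => hpush h (-v)) [] =
      (PySem.List.sorted xs (fun x => x) true).map (fun v => -v) := by
  have h1 : xs.foldl (fun h v => hpush h (-v)) [] =
      (xs.map (fun v => -v)).foldl
        (fun acc x => PySem.List.insertBy (fun a b => decide (a < b)) x acc) [] := by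
    rw [List.foldl_map]; rfl
  rw [h1, ← PySem.List.sorted_eq_foldl_insertBy (xs.map (fun v => -v)) (fun x => x)]
  apply PySem.List.sorted_id_eq_of_perm_of_pairwise
  · exact (PySem.List.sorted_perm xs (fun x => x) true).map _
  · exact List.Pairwise.map _ (fun _ _ hba => neg_le_neg hba)
      (PySem.List.sorted_pairwise_rev xs (fun x => x))

-- the heap loop on negated descending lists is the two-pointer scan
theorem aloop_eq_altLoop (sa : List Int) :
    ∀ (sb : List Int) (ans : Int), sb.Pairwise (fun a b => b ≤ a) →
      aloop (sa.map (fun v => -v)) (sb.map (fun v => -v)) ans = altLoop sa sb ans := by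
  induction sa with
  | nil => intro sb ans _; cases sb <;> rfl
  | cons a rest ih =>
      intro sb ans hp
      cases sb with
      | nil => rfl
      | cons b0 btail =>
          have hp' := (List.pairwise_cons.mp hp)
          by_cases hab : a < b0
          · simp only [List.map_cons, aloop, altLoop, neg_neg, if_pos hab]
            exact ih btail (ans + 1) hp'.2
          · have hins : hpush (btail.map (fun v => -v)) (-b0) = (-b0) :: btail.map (fun v => -v) := by
              apply insertBy_bottom
              intro y hy
              rcases List.mem_map.mp hy with ⟨z, hz, rfl⟩
              exact neg_le_neg (hp'.1 z hz)
            simp only [List.map_cons, aloop, altLoop, neg_neg, if_neg hab, hins]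
            exact ih (b0 :: btail) ans hp

-- mergeDesc is a permutation of the concatenation
theorem mergeDesc_perm : ∀ (l₁ l₂ : List Int), (mergeDesc l₁ l₂).Perm (l₁ ++ l₂)
  | [], l₂ => by simp [mergeDesc]
  | a :: as_, [] => by simp [mergeDesc]
  | a :: as_, b :: bs => by
      unfold mergeDesc
      split
      · exact (mergeDesc_perm as_ (b :: bs)).cons a
      · exact ((mergeDesc_perm (a :: as_) bs).cons b).trans List.perm_middle.symm
termination_by l₁ l₂ => l₁.length + l₂.length

-- mergeDesc of two descending lists is descending
theorem mergeDesc_pairwise : ∀ (l₁ l₂ : List Int),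
    l₁.Pairwise (fun x y => y ≤ x) → l₂.Pairwise (fun x y => y ≤ x) →
    (mergeDesc l₁ l₂).Pairwise (fun x y => y ≤ x)
  | [], l₂, _, h₂ => by simpa [mergeDesc] using h₂
  | a :: as_, [], h₁, _ => by simpa [mergeDesc] using h₁
  | a :: as_, b :: bs, h₁, h₂ => by
      unfold mergeDesc
      rcases List.pairwise_cons.mp h₁ with ⟨ha, has⟩
      rcases List.pairwise_cons.mp h₂ with ⟨hb, hbs⟩
      split
      · rename_i hba
        refine List.pairwise_cons.mpr ⟨?_, mergeDesc_pairwise as_ (b :: bs) has h₂⟩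
        intro y hy
        have := (mergeDesc_perm as_ (b :: bs)).mem_iff.mp hy
        rcases List.mem_append.mp this with h | h
        · exact ha y h
        · rcases List.mem_cons.mp h with rfl | h
          · exact hba
          · exact le_trans (hb y h) hba
      · rename_i hba
        have hab : a ≤ b := le_of_lt (lt_of_not_ge hba)
        refine List.pairwise_cons.mpr ⟨?_, mergeDesc_pairwise (a :: as_) bs h₁ hbs⟩
        intro y hy
        have := (mergeDesc_perm (a :: as_) bs).mem_iff.mp hy
        rcases List.mem_append.mp this with h | h
        · rcases List.mem_cons.mp h with rfl | h
          · exact hab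
          · exact le_trans (ha y h) hab
        · exact hb y h
termination_by l₁ l₂ => l₁.length + l₂.length

-- the sorted event list is the merge of the two sorted encoded lists
theorem sorted_events_eq (A B : List Int) :
    PySem.List.sorted (A.map (fun a => 2 * a + 1) ++ B.map (fun b => 2 * b)) (fun x => x) true =
      mergeDesc ((PySem.List.sorted A (fun x => x) true).map (fun a => 2 * a + 1))
        ((PySem.List.sorted B (fun x => x) true).map (fun b => 2 * b)) := by
  apply PySem.List.eq_of_perm_of_pairwise_le_of_injective (fun x : Int => -x) neg_injective
  · refine (PySem.List.sorted_perm _ (fun x => x) true).trans ?_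
    refine (List.Perm.append ((PySem.List.sorted_perm A (fun x => x) true).map _)
      ((PySem.List.sorted_perm B (fun x => x) true).map _)).symm.trans ?_
    exact (mergeDesc_perm _ _).symm
  · exact (PySem.List.sorted_pairwise_rev _ (fun x => x)).imp (fun h => neg_le_neg h)
  · refine (List.Pairwise.imp (fun h => neg_le_neg h) ?_ :
      List.Pairwise (fun a b : Int => -a ≤ -b) _)
    apply mergeDesc_pairwise
    · exact List.pairwise_map.mpr
        ((PySem.List.sorted_pairwise_rev A (fun x => x)).imp (by intro a b h; omega))
    · exact List.pairwise_map.mpr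
        ((PySem.List.sorted_pairwise_rev B (fun x => x)).imp (by intro a b h; omega))

-- fold form of B's scan equals a tail recursion
def mrec : List Int → Int → Int → Int
  | [], _, ans => ans
  | e :: rest, avail, ans =>
      if PySem.Int.mod e 2 = 0 then mrec rest (avail + 1) ans
      else if avail ≠ 0 then mrec rest (avail - 1) (ans + 1)
      else mrec rest avail ans

theorem foldl_bstep_eq_mrec : ∀ (l : List Int) (avail ans : Int),
    (l.foldl bstep (avail, ans)).2 = mrec l avail ans
  | [], _, _ => rfl
  | e :: rest, avail, ans => by
      simp only [List.foldl_cons, bstep, mrec]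
      split
      · exact foldl_bstep_eq_mrec rest _ _
      · split
        · exact foldl_bstep_eq_mrec rest _ _
        · exact foldl_bstep_eq_mrec rest _ _

theorem mergeDesc_nil (l : List Int) : mergeDesc l [] = l := by
  cases l <;> simp [mergeDesc]

-- resolved single steps of the sweep
theorem mrec_even_step (b : Int) (rest : List Int) (avail ans : Int) :
    mrec ((2 * b) :: rest) avail ans = mrec rest (avail + 1) ans := by
  simp [mrec]

theorem mrec_odd_zero (a : Int) (rest : List Int) (ans : Int) :
    mrec ((2 * a + 1) :: rest) 0 ans = mrec rest 0 ans := by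
  simp [mrec]

theorem mrec_odd_succ (a : Int) (rest : List Int) (n : Nat) (ans : Int) :
    mrec ((2 * a + 1) :: rest) ((n : Int) + 1) ans = mrec rest (n : Int) (ans + 1) := by
  have h : ((n : Int) + 1) ≠ 0 := by omega
  simp [mrec, h]

-- a tail of pure B events only banks, never counts
theorem mrec_evens : ∀ (bs : List Int) (avail ans : Int),
    mrec (bs.map (fun b => 2 * b)) avail ans = ans
  | [], _, _ => rfl
  | b :: bs, avail, ans => by
      rw [List.map_cons, mrec_even_step]
      exact mrec_evens bs (avail + 1) ans

-- a tail of pure A events with an empty bank never counts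
theorem mrec_odds : ∀ (sa : List Int) (ans : Int),
    mrec (sa.map (fun a => 2 * a + 1)) 0 ans = ans
  | [], _ => rfl
  | a :: rest, ans => by
      rw [List.map_cons, mrec_odd_zero]
      exact mrec_odds rest ans

-- key lemma: the sweep over the merged encoded lists is the two-pointer greedy,
-- with the banked B elements made explicit as a list B' of values beating all of sa
theorem mrec_merge_eq_altLoop : ∀ (sa sb B' : List Int) (ans : Int),
    sa.Pairwise (fun x y => y ≤ x) →
    (∀ x ∈ B', ∀ a ∈ sa, a < x) →
    mrec (mergeDesc (sa.map (fun a => 2 * a + 1)) (sb.map (fun b => 2 * b)))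
        (B'.length : Int) ans = altLoop sa (B' ++ sb) ans
  | [], sb, B', ans, _, _ => by
      simp only [List.map_nil, mergeDesc, mrec_evens]
      rfl
  | a :: as_, [], B', ans, h1, h2 => by
      have h1' := (List.pairwise_cons.mp h1).2
      cases B' with
      | nil =>
          simp only [List.map_cons, List.map_nil, mergeDesc_nil, List.length_nil,
            Nat.cast_zero, mrec_odd_zero]
          rw [mrec_odds]
          rfl
      | cons x B'' =>
          simp only [List.map_cons, List.map_nil, mergeDesc_nil, List.length_cons]
          rw [show ((B''.length + 1 : Nat) : Int) = (B''.length : Int) + 1 from by push_cast; ring,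
            mrec_odd_succ]
          have hx : a < x := h2 x (by simp) a (by simp)
          have := mrec_merge_eq_altLoop as_ [] B'' (ans + 1) h1'
            (fun y hy a' ha' => h2 y (by simp [hy]) a' (by simp [ha']))
          rw [List.map_nil, mergeDesc_nil] at this
          simpa [altLoop, hx] using this
  | a :: as_, b :: bs, B', ans, h1, h2 => by
      have h1' := (List.pairwise_cons.mp h1)
      by_cases hba : b ≤ a
      · have hcond : (2 * b : Int) ≤ 2 * a + 1 := by omega
        cases B' with
        | nil =>
            simp only [List.map_cons, mergeDesc]
            rw [if_pos hcond]
            simp only [List.length_nil, Nat.cast_zero, mrec_odd_zero]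
            have := mrec_merge_eq_altLoop as_ (b :: bs) [] ans h1'.2 (by simp)
            simpa [altLoop, not_lt.mpr hba] using this
        | cons x B'' =>
            simp only [List.map_cons, mergeDesc]
            rw [if_pos hcond, List.length_cons,
              show ((B''.length + 1 : Nat) : Int) = (B''.length : Int) + 1 from by push_cast; ring,
              mrec_odd_succ]
            have hx : a < x := h2 x (by simp) a (by simp)
            have := mrec_merge_eq_altLoop as_ (b :: bs) B'' (ans + 1) h1'.2
              (fun y hy a' ha' => h2 y (by simp [hy]) a' (by simp [ha']))
            simpa [altLoop, hx] using this
      · have hcond : ¬ ((2 * b : Int) ≤ 2 * a + 1) := by omega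
        simp only [List.map_cons, mergeDesc]
        rw [if_neg hcond, mrec_even_step,
          show ((B'.length : Int) + 1) = (((B' ++ [b]).length : Nat) : Int) from by
            rw [List.length_append, List.length_cons, List.length_nil]; push_cast; ring]
        have hBb : ∀ x ∈ B' ++ [b], ∀ a' ∈ a :: as_, a' < x := by
          intro x hx a' ha'
          rcases List.mem_append.mp hx with h | h
          · exact h2 x h a' ha'
          · rcases List.mem_singleton.mp h with rfl
            rcases List.mem_cons.mp ha' with rfl | h
            · omega
            · exact lt_of_le_of_lt (h1'.1 a' h) (by omega)
        have := mrec_merge_eq_altLoop (a :: as_) bs (B' ++ [b]) ans h1 hBb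
        simpa [List.append_assoc] using this
termination_by sa sb _ _ => sa.length + sb.length

-- ===== VERDICT (by name: the statement is the Claim_ definition above) =====
theorem solution_spec : Claim_equal_solution := by
  intro A B _
  unfold Spec_solution solution solution_alt
  rw [build_eq A, build_eq B, sorted_events_eq]
  rw [foldl_bstep_eq_mrec]
  rw [aloop_eq_altLoop _ _ 0 (PySem.List.sorted_pairwise_rev B (fun x => x))]
  have := mrec_merge_eq_altLoop (PySem.List.sorted A (fun x => x) true)
      (PySem.List.sorted B (fun x => x) true) [] 0
      (PySem.List.sorted_pairwise_rev A (fun x => x)) (by simp)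
  simpa using this.symm
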